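-- pv_equiv track=rewrite | github.com/yeahzizi/algorithm | 프로그래머스/level 2/PR. 구현. 124 나라의 숫자.py | solution
-- ===== SOURCE A (Python) =====
-- def solution(n):
--     answer = ''
--     result = ['1', '2', '4']
--
--     if n >= 4:
--         for i in range(3, n):
--             now = result[(i // 3) - 1] + result[(i % 3)]
--             result.append(now)
--
--     return result[n - 1]
-- ===== SOURCE B (Python) =====
-- def solution(n):
--     digits = '124'
--     s = ''
--     while n > 0:
--         n -= 1
--         s = digits[n % 3] + s
--         n //= 3
--     return s
-- ===== Notes on version B (the rewrite author's own statement) =====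
-- stated objective: faster
-- what changed: B replaces A's O(n) table that memoizes every 124-number up to n with a direct digit-by-digit base-3 conversion (repeated divmod on n-1, prepending '1'/'2'/'4'), O(log n) time and space.
-- intended difference: For n in {-2,-1,0} A's negative-index wraparound into the seed list ['1','2','4'] accidentally returns '1'/'2'/'4', while B returns '' — the empty digit string is the natural value for a non-positive index in this numbering. — e.g. on solution(0): A returns "4", B returns ""
import Mathlib
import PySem

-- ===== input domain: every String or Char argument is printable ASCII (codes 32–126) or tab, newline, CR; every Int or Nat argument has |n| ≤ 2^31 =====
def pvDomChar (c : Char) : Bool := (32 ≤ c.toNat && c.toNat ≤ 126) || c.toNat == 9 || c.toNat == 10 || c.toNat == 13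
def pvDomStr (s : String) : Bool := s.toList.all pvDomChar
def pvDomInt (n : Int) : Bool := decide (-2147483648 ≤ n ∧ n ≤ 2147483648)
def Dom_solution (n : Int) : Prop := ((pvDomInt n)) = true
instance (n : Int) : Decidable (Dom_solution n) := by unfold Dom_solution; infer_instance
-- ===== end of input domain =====

-- B replaces A's O(n) memo table of all 124-numbers up to n with a direct digit-by-digit
-- base-3 conversion (repeated divmod on n-1), asymptotically faster.
-- Strings are represented as List Char inside the ports (String.ofList at the end), per the PySem convention.

-- ===== PORT A =====
-- one loop step: result.append(result[(i // 3) - 1] + result[i % 3])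
def solutionStep (res : List (List Char)) (i : Int) : List (List Char) :=
  res ++ [((PySem.List.pyGet? res (PySem.Int.floordiv i 3 - 1)).getD []) ++
          ((PySem.List.pyGet? res (PySem.Int.mod i 3)).getD [])]

def solution (n : Int) : String :=
  String.ofList ((PySem.List.pyGet?
    (if n ≥ 4 then (PySem.List.pyRange 3 n 1).foldl solutionStep [['1'], ['2'], ['4']]
     else [['1'], ['2'], ['4']])
    (n - 1)).getD [])

-- ===== PORT B =====
-- while n > 0: n -= 1; s = digits[n % 3] + s; n //= 3
def solutionAltLoop (n : Int) (s : List Char) : List Char :=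
  if h : 0 < n then
    solutionAltLoop (PySem.Int.floordiv (n - 1) 3)
      (((PySem.List.pyGet? ['1', '2', '4'] (PySem.Int.mod (n - 1) 3)).getD ' ') :: s)
  else s
termination_by n.toNat
decreasing_by
  have h3 : PySem.Int.floordiv (n - 1) 3 = (n - 1) / 3 :=
    PySem.Int.floordiv_eq_ediv_of_pos (by omega)
  rw [h3]; omega

def solution_alt (n : Int) : String := String.ofList (solutionAltLoop n [])

-- ===== PRECONDITION & SPEC =====
-- Pre_ excludes n ≤ -3, where A raises IndexError (negative index past the 3-element seed list).
def Pre_solution (n : Int) : Prop := -2 ≤ n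
instance (n : Int) : Decidable (Pre_solution n) := by unfold Pre_solution; infer_instance
def pvWitness_solution : Int := (5)

-- For n in {-2,-1,0} A's negative-index wraparound into the seed list ['1','2','4'] accidentally
-- returns '1'/'2'/'4', while B returns '' — the empty digit string is the natural value there.
def D_solution (n : Int) : Prop := -2 ≤ n ∧ n ≤ 0
instance (n : Int) : Decidable (D_solution n) := by unfold D_solution; infer_instance

def Spec_solution (n : Int) (out : String) : Prop := ¬ D_solution n → out = solution_alt n
instance (n : Int) (out : String) : Decidable (Spec_solution n out) := by unfold Spec_solution; infer_instance

def pvDiffWitness_solution : Int := (0)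
def pvDiffWitnessOut_solution : String × String := ("4", "")

-- ===== CLAIM (what is proved, stated in full; the proofs are below) =====
def Claim_unchanged_solution : Prop := ∀ (n : Int), Dom_solution n → Pre_solution n → Spec_solution n (solution n)
def Claim_changed_solution : Prop := Dom_solution (pvDiffWitness_solution) ∧ Pre_solution (pvDiffWitness_solution) ∧ D_solution (pvDiffWitness_solution) ∧ solution (pvDiffWitness_solution) = pvDiffWitnessOut_solution.1 ∧ solution_alt (pvDiffWitness_solution) = pvDiffWitnessOut_solution.2 ∧ pvDiffWitnessOut_solution.1 ≠ pvDiffWitnessOut_solution.2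
def Claim_exact_solution : Prop := ∀ (n : Int), Dom_solution n → Pre_solution n → D_solution n → solution n ≠ solution_alt n

-- ===== LEMMAS AND PROOFS =====

-- the digit list of the k-th 124-number (k ≥ 1); g 0 = []
def gDigit (r : Nat) : Char := if r = 0 then '1' else if r = 1 then '2' else '4'

def g : Nat → List Char
  | 0 => []
  | (k + 1) => g (k / 3) ++ [gDigit (k % 3)]
termination_by k => k
decreasing_by omega

theorem altLoop_nonpos (n : Int) (s : List Char) (h : ¬ 0 < n) : solutionAltLoop n s = s := by
  rw [solutionAltLoop]; simp [h]

theorem g_succ (k : Nat) : g (k + 1) = g (k / 3) ++ [gDigit (k % 3)] := by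
  simp only [g]

theorem g_small_succ (r : Nat) (h : r < 3) : g (r + 1) = [gDigit r] := by
  simp [g_succ, Nat.div_eq_of_lt h, Nat.mod_eq_of_lt h, g]

theorem altLoop_g (n : Int) (s : List Char) (h : 0 ≤ n) :
    solutionAltLoop n s = g n.toNat ++ s := by
  obtain ⟨N, hN⟩ : ∃ N : Nat, n.toNat = N := ⟨_, rfl⟩
  induction N using Nat.strong_induction_on generalizing n s with
  | _ N ih =>
    rw [solutionAltLoop]
    by_cases hp : 0 < n
    · set k := (n - 1).toNat with hk
      have hn1 : n - 1 = (k : Int) := by omega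
      have hfd : PySem.Int.floordiv (n - 1) 3 = ((k / 3 : Nat) : Int) := by
        rw [hn1]; exact_mod_cast PySem.Int.floordiv_natCast k 3
      have hmd : PySem.Int.mod (n - 1) 3 = ((k % 3 : Nat) : Int) := by
        rw [hn1]; exact_mod_cast PySem.Int.mod_natCast k 3
      rw [dif_pos hp, hfd, hmd,
        ih (k / 3) (by omega) _ _ (by omega) (by omega)]
      have hnt : n.toNat = k + 1 := by omega
      rw [hnt, g_succ, List.append_assoc]
      congr 1
      have h3 : k % 3 = 0 ∨ k % 3 = 1 ∨ k % 3 = 2 := by omega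
      rcases h3 with h3 | h3 | h3 <;> rw [h3] <;> rfl
    · rw [dif_neg hp]
      have h0 : n.toNat = 0 := by omega
      rw [h0]
      simp [g]

theorem build_eq (m : Int) (h : 3 ≤ m) :
    (PySem.List.pyRange 3 m 1).foldl solutionStep [['1'], ['2'], ['4']] =
      (List.range m.toNat).map (fun k => g (k + 1)) := by
  induction m, h using Int.le_induction with
  | base =>
      rw [PySem.List.pyRange_one_eq_nil (by omega), List.foldl_nil,
        show (3 : Int).toNat = 3 from rfl,
        show List.range 3 = [0, 1, 2] from rfl]
      simp [g_small_succ, gDigit]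
  | succ m hm ih =>
      rw [PySem.List.pyRange_one_succ_right (by omega), List.foldl_append,
        List.foldl_cons, List.foldl_nil, ih]
      set M := m.toNat with hM
      have hmM : m = (M : Int) := by omega
      have hq1 : 1 ≤ M / 3 := by omega
      have hqM : M / 3 - 1 < M := by omega
      have hrM : M % 3 < M := by omega
      have hfd0 : PySem.Int.floordiv m 3 = ((M / 3 : Nat) : Int) := by
        rw [hmM]; exact_mod_cast PySem.Int.floordiv_natCast M 3
      have hfd : PySem.Int.floordiv m 3 - 1 = ((M / 3 - 1 : Nat) : Int) := by
        rw [hfd0]; omega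
      have hmd : PySem.Int.mod m 3 = ((M % 3 : Nat) : Int) := by
        rw [hmM]; exact_mod_cast PySem.Int.mod_natCast M 3
      have hnt : (m + 1).toNat = M + 1 := by omega
      rw [hnt, List.range_succ, List.map_append, List.map_singleton]
      unfold solutionStep
      rw [hfd, hmd, PySem.List.pyGet?_natCast, PySem.List.pyGet?_natCast,
        List.getElem?_map, List.getElem?_range hqM,
        List.getElem?_map, List.getElem?_range hrM]
      simp only [Option.map_some, Option.getD_some]
      rw [show M / 3 - 1 + 1 = M / 3 from by omega,
        g_small_succ (M % 3) (by omega), g_succ M]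

-- ===== VERDICT (by name: the statement is the Claim_ definition above) =====
theorem solution_spec : Claim_unchanged_solution := by
  intro n _ hpre hnd
  have h1 : 1 ≤ n := by
    unfold Pre_solution at hpre; unfold D_solution at hnd; omega
  show solution n = solution_alt n
  unfold solution solution_alt
  rw [altLoop_g n [] (by omega), List.append_nil]
  by_cases h4 : n ≥ 4
  · rw [if_pos h4, build_eq n (by omega)]
    have hlt : n.toNat - 1 < n.toNat := by omega
    have hcast : n - 1 = ((n.toNat - 1 : Nat) : Int) := by omega
    rw [hcast, PySem.List.pyGet?_natCast, List.getElem?_map,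
      List.getElem?_range hlt]
    simp only [Option.map_some, Option.getD_some]
    rw [show n.toNat - 1 + 1 = n.toNat from by omega]
  · rw [if_neg h4]
    have h3 : n = 1 ∨ n = 2 ∨ n = 3 := by omega
    rcases h3 with h3 | h3 | h3 <;> subst h3
    · rw [show Int.toNat 1 = 0 + 1 from rfl, g_small_succ 0 (by omega)]; rfl
    · rw [show Int.toNat 2 = 1 + 1 from rfl, g_small_succ 1 (by omega)]; rfl
    · rw [show Int.toNat 3 = 2 + 1 from rfl, g_small_succ 2 (by omega)]; rfl

theorem solution_changed : Claim_changed_solution := by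
  unfold Claim_changed_solution
  refine ⟨by decide, by decide, by decide, by decide, ?_, by decide⟩
  show solution_alt 0 = ""
  unfold solution_alt
  rw [altLoop_nonpos 0 [] (by omega)]

theorem solution_tight : Claim_exact_solution := by
  intro n _ _ hd
  unfold D_solution at hd
  have hb : solution_alt n = "" := by
    unfold solution_alt
    rw [altLoop_nonpos n [] (by omega)]
  rw [hb]
  have h3 : n = -2 ∨ n = -1 ∨ n = 0 := by omega
  rcases h3 with h3 | h3 | h3 <;> subst h3 <;> decide
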